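-- pv_equiv track=rewrite | github.com/Luthey-Schulten-Lab/SummerSchool_2025 | CME/analyze_scripts/WCM_gene.py | get_tRNAMap
-- ===== SOURCE A (Python) =====
-- def get_tRNAMap(genome):
--     """
--     Set up the dictionary aa_tRNA with amino acids and correspoding tRNAs {'LEU': ['R_0070', 'R_0423', 'R_0506'],...}
--     tRNA_aa: {'R_0070':LEU, }
--     """
--     aa_tRNA = {}
--
--     for locusTag, locusDict in genome.items():
--
--         if locusDict['Type'] == "tRNA":
--
--             locusNum = locusTag.split('_')[1]
--
--             rnaID = 'R_'+locusNum
--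
--             rnaName = locusDict['GeneName'].split('-')[1].upper()
--
--             if rnaName not in aa_tRNA:
--
--                 aa_tRNA[rnaName] = [rnaID]
--
--             else:
--
--                 aa_tRNA[rnaName].append(rnaID)
--
--     tRNA_aa = {}
--
--     for aa, tRNAs in aa_tRNA.items():
--         for tRNA in tRNAs:
--             tRNA_aa[tRNA] = aa
--
--
--     return aa_tRNA, tRNA_aa
-- ===== SOURCE B (Python) =====
-- def get_tRNAMap(genome):
--     """Group-by decomposition: extract (rnaID, aaName) pairs once, then build both
--     dictionaries from that pair list (per-amino-acid grouping and a flat id->aa map)."""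
--     pairs = [('R_' + tag.split('_')[1], d['GeneName'].split('-')[1].upper())
--              for tag, d in genome.items() if d['Type'] == 'tRNA']
--     names = list(dict.fromkeys(name for _, name in pairs))
--     aa_tRNA = {name: [rid for rid, n in pairs if n == name] for name in names}
--     tRNA_aa = {rid: name for name in names for rid in aa_tRNA[name]}
--     return aa_tRNA, tRNA_aa
-- ===== Notes on version B (the rewrite author's own statement) =====
-- stated objective: alternative
-- what changed: Replaces A's incremental dict-building (conditional append inside the genome loop, then a second inversion loop) by a group-by pipeline: extract the (rnaID, aaName) pair list once, dedup the names, and build both dictionaries by per-name grouping over that pair list.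
import Mathlib
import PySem

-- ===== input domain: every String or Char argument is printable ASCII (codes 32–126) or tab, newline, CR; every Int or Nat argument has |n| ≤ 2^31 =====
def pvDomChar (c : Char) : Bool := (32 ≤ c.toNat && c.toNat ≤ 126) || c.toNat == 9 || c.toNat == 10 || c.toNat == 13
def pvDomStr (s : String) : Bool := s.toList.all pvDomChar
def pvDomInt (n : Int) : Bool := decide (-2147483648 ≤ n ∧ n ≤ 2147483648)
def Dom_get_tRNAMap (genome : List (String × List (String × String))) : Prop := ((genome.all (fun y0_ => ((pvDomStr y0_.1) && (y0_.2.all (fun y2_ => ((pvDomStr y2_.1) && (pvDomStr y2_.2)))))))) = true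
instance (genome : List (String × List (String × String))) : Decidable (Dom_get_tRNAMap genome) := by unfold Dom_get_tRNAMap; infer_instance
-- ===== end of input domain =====

-- B replaces the incremental two-loop dict construction by a group-by pipeline over an
-- extracted pair list (objective: alternative decomposition, no speed claim).

-- ===== PORT A =====
-- literal transliteration of A: one loop growing aa_tRNA (conditional append),
-- then a second loop over its items inverting it into tRNA_aa.
def get_tRNAMap (genome : List (String × List (String × String))) :
    (List (String × List String)) × (List (String × String)) :=
  let aa_tRNA : PySem.Dict String (List String) :=
    genome.foldl (fun aa p =>
      if (p.2.lookup "Type").getD "" == "tRNA" then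
        let locusNum := ((PySem.Str.split? p.1 "_").getD []).getD 1 ""
        let rnaID := "R_" ++ locusNum
        let rnaName := PySem.Str.upper
          (((PySem.Str.split? ((p.2.lookup "GeneName").getD "") "-").getD []).getD 1 "")
        if aa.contains rnaName = false then
          aa.insert rnaName [rnaID]
        else
          aa.insert rnaName (aa.getD rnaName [] ++ [rnaID])
      else aa) PySem.Dict.empty
  let tRNA_aa : PySem.Dict String String :=
    aa_tRNA.items.foldl (fun taa q =>
      q.2.foldl (fun t2 tr => t2.insert tr q.1) taa) PySem.Dict.empty
  (aa_tRNA.items, tRNA_aa.items)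

-- ===== PORT B =====
-- literal transliteration of B (Source B): pair extraction, ordered name dedup, grouping.
def get_tRNAMap_alt (genome : List (String × List (String × String))) :
    (List (String × List String)) × (List (String × String)) :=
  let pairs : List (String × String) :=
    (genome.filter (fun p => (p.2.lookup "Type").getD "" == "tRNA")).map
      (fun p => ("R_" ++ ((PySem.Str.split? p.1 "_").getD []).getD 1 "",
                 PySem.Str.upper
                   (((PySem.Str.split? ((p.2.lookup "GeneName").getD "") "-").getD []).getD 1 "")))
  let names := PySem.List.dedup (pairs.map Prod.snd)
  let aa_tRNA := names.map (fun name => (name, (pairs.filter (fun q => q.2 == name)).map Prod.fst))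
  let tRNA_aa : PySem.Dict String String :=
    names.foldl (fun taa name =>
      ((aa_tRNA.lookup name).getD []).foldl (fun t2 rid => t2.insert rid name) taa) PySem.Dict.empty
  (aa_tRNA, tRNA_aa.items)

-- ===== PRECONDITION & SPEC =====
-- Pre_ excludes exactly the inputs on which the Python A raises: a locus dict without a
-- 'Type' key (KeyError), and for tRNA entries a locus tag without '_' or a 'GeneName'
-- missing or without '-' (KeyError/IndexError on the [1] after split).
def Pre_get_tRNAMap (genome : List (String × List (String × String))) : Prop :=
  ∀ p ∈ genome, (p.2.lookup "Type").isSome = true ∧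
    (p.2.lookup "Type" = some "tRNA" →
      2 ≤ ((PySem.Str.split? p.1 "_").getD []).length ∧
      (p.2.lookup "GeneName").isSome = true ∧
      2 ≤ ((PySem.Str.split? ((p.2.lookup "GeneName").getD "") "-").getD []).length)
instance (genome : List (String × List (String × String))) : Decidable (Pre_get_tRNAMap genome) := by
  unfold Pre_get_tRNAMap; infer_instance

def pvWitness_get_tRNAMap : (List (String × List (String × String))) :=
  [("JCVISYN3A_0070", [("Type", "tRNA"), ("GeneName", "tRNA-Leu")]),
   ("JCVISYN3A_0001", [("Type", "protein")])]

def Spec_get_tRNAMap (genome : List (String × List (String × String))) (out : (List (String × List String)) × (List (String × String))) : Prop := out = get_tRNAMap_alt genome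
instance (genome : List (String × List (String × String))) (out : (List (String × List String)) × (List (String × String))) : Decidable (Spec_get_tRNAMap genome out) := by unfold Spec_get_tRNAMap; infer_instance

-- ===== CLAIM (what is proved, stated in full; the proofs are below) =====
def Claim_equal_get_tRNAMap : Prop := ∀ (genome : List (String × List (String × String))), Dom_get_tRNAMap genome → Pre_get_tRNAMap genome → Spec_get_tRNAMap genome (get_tRNAMap genome)

-- ===== LEMMAS AND PROOFS =====

-- the per-entry condition and extracted pair (proof-only abbreviations)
def pvCond (p : String × List (String × String)) : Bool :=
  (p.2.lookup "Type").getD "" == "tRNA"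

def pvF (p : String × List (String × String)) : String × String :=
  ("R_" ++ ((PySem.Str.split? p.1 "_").getD []).getD 1 "",
   PySem.Str.upper (((PySem.Str.split? ((p.2.lookup "GeneName").getD "") "-").getD []).getD 1 ""))

-- A's loop body on an extracted pair
def pvStep (aa : PySem.Dict String (List String)) (q : String × String) :
    PySem.Dict String (List String) :=
  if aa.contains q.2 = false then aa.insert q.2 [q.1]
  else aa.insert q.2 (aa.getD q.2 [] ++ [q.1])

-- B's grouped dictionary as a list
def pvGroup (ps : List (String × String)) : List (String × List String) :=
  (PySem.List.dedup (ps.map Prod.snd)).map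
    (fun n => (n, (ps.filter (fun q => q.2 == n)).map Prod.fst))


theorem pv_dedup_append_singleton {α : Type} [BEq α] [LawfulBEq α] (xs : List α) (x : α) :
    PySem.List.dedup (xs ++ [x]) =
      if x ∈ xs then PySem.List.dedup xs else PySem.List.dedup xs ++ [x] := by
  simp only [PySem.List.dedup_eq_ofList, PySem.Set.ofList_append, PySem.Set.update_cons,
    PySem.Set.update_nil, PySem.Set.add]
  by_cases h : x ∈ xs
  · simp [h, PySem.Set.contains, PySem.Set.mem_ofList]
  · simp [h, PySem.Set.contains, PySem.Set.mem_ofList]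


theorem pv_foldA_eq_foldStep (genome : List (String × List (String × String))) :
    genome.foldl (fun aa p =>
      if (p.2.lookup "Type").getD "" == "tRNA" then
        let locusNum := ((PySem.Str.split? p.1 "_").getD []).getD 1 ""
        let rnaID := "R_" ++ locusNum
        let rnaName := PySem.Str.upper
          (((PySem.Str.split? ((p.2.lookup "GeneName").getD "") "-").getD []).getD 1 "")
        if aa.contains rnaName = false then
          aa.insert rnaName [rnaID]
        else
          aa.insert rnaName (aa.getD rnaName [] ++ [rnaID])
      else aa) PySem.Dict.empty
    = ((genome.filter pvCond).map pvF).foldl pvStep PySem.Dict.empty := by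
  rw [List.foldl_map, List.foldl_filter]
  rfl

theorem pv_fold_group (ps : List (String × String)) :
    (ps.foldl pvStep PySem.Dict.empty).items = pvGroup ps := by
  induction ps using List.reverseRecOn with
  | nil => rfl
  | append_singleton ps p ih =>
    rw [List.foldl_append]
    simp only [List.foldl_cons, List.foldl_nil]
    set d := ps.foldl pvStep PySem.Dict.empty with hdd
    have hkeys : d.keys = PySem.List.dedup (ps.map Prod.snd) := by
      show d.items.map Prod.fst = _
      rw [ih]; unfold pvGroup; rw [List.map_map]
      simp [Function.comp_def]
    have hnodup : d.keys.Nodup := by rw [hkeys]; exact PySem.List.nodup_dedup _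
    have hcont : d.contains p.2 = decide (p.2 ∈ ps.map Prod.snd) := by
      rw [PySem.Dict.contains_eq_decide_mem_keys, hkeys]
      simp
    by_cases h : p.2 ∈ ps.map Prod.snd
    · -- existing amino acid
      have hfilter_nil : ∀ n ∈ PySem.List.dedup (ps.map Prod.snd),
          (ps ++ [p]).filter (fun q => q.2 == n) =
            ps.filter (fun q => q.2 == n) ++ (if n = p.2 then [p] else []) := by
        intro n hn
        rw [List.filter_append]
        congr 1
        by_cases hnp : n = p.2
        · subst hnp; simp [List.filter]
        · have hb : (p.2 == n) = false := by simpa using Ne.symm hnp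
          simp [List.filter, hb, hnp]
      have hmem : (p.2, (ps.filter (fun q => q.2 == p.2)).map Prod.fst) ∈ d.items := by
        rw [ih]; unfold pvGroup
        exact List.mem_map_of_mem (by rwa [PySem.List.mem_dedup])
      have hgetD : d.getD p.2 [] = (ps.filter (fun q => q.2 == p.2)).map Prod.fst :=
        PySem.Dict.getD_of_mem_items d hmem hnodup []
      have : pvStep d p = d.insert p.2 (d.getD p.2 [] ++ [p.1]) := by
        unfold pvStep; rw [hcont]; simp [h]
      rw [this, PySem.Dict.items_insert_of_contains d _ (by rw [hcont]; simp [h]), ih]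
      unfold pvGroup
      rw [List.map_map, List.map_append]
      simp only [List.map_cons, List.map_nil]
      rw [pv_dedup_append_singleton, if_pos h]
      apply List.map_congr_left
      intro n hn
      rw [hfilter_nil n hn]
      by_cases hnp : n = p.2
      · subst hnp; simp [hgetD]
      · simp [hnp]
    · -- new amino acid
      have : pvStep d p = d.insert p.2 [p.1] := by
        unfold pvStep; rw [hcont]; simp [h]
      rw [this, PySem.Dict.items_insert_of_not_contains d _ (by rw [hcont]; simp [h]), ih]
      unfold pvGroup
      rw [List.map_append]
      simp only [List.map_cons, List.map_nil]
      rw [pv_dedup_append_singleton, if_neg h, List.map_append]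
      congr 1
      · apply List.map_congr_left
        intro n hn
        rw [List.filter_append]
        have hnp : n ≠ p.2 := by
          rw [PySem.List.mem_dedup] at hn
          intro e; exact h (e ▸ hn)
        have hb : (p.2 == n) = false := by simpa using Ne.symm hnp
        simp [List.filter, hb]
      · have : ps.filter (fun q => q.2 == p.2) = [] := by
          rw [List.filter_eq_nil_iff]
          intro q hq e
          rw [beq_iff_eq] at e
          exact h (e ▸ List.mem_map_of_mem (f := Prod.snd) hq)
        simp [List.filter_append, this, List.filter]

theorem pv_lookup_map_self {α : Type} (g : String → α) (names : List String) (n : String)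
    (h : n ∈ names) : (names.map (fun m => (m, g m))).lookup n = some (g n) := by
  induction names with
  | nil => cases h
  | cons m ms ih =>
    simp only [List.map_cons, List.lookup]
    by_cases e : n = m
    · subst e; simp
    · have hb : (n == m) = false := by simpa using e
      rw [hb]
      exact ih ((List.mem_cons.mp h).resolve_left e)

-- ===== VERDICT (by name: the statement is the Claim_ definition above) =====
theorem get_tRNAMap_spec : Claim_equal_get_tRNAMap := by
  intro genome _ _
  show get_tRNAMap genome = get_tRNAMap_alt genome
  unfold get_tRNAMap get_tRNAMap_alt
  dsimp only
  have hpairs :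
      (genome.filter (fun p => (p.2.lookup "Type").getD "" == "tRNA")).map
        (fun p => ("R_" ++ ((PySem.Str.split? p.1 "_").getD []).getD 1 "",
          PySem.Str.upper
            (((PySem.Str.split? ((p.2.lookup "GeneName").getD "") "-").getD []).getD 1 "")))
      = (genome.filter pvCond).map pvF := rfl
  rw [hpairs, pv_foldA_eq_foldStep, pv_fold_group]
  set pairs := (genome.filter pvCond).map pvF with hp
  set names := PySem.List.dedup (pairs.map Prod.snd) with hn
  set g : String → List String :=
    fun n => (pairs.filter (fun q => q.2 == n)).map Prod.fst with hg
  have hG : pvGroup pairs = names.map (fun n => (n, g n)) := rfl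
  rw [hG]
  refine Prod.ext rfl ?_
  show ((names.map (fun n => (n, g n))).foldl (fun taa q =>
      q.2.foldl (fun t2 tr => t2.insert tr q.1) taa) PySem.Dict.empty).items = _
  rw [List.foldl_map]
  have := PySem.List.foldl_congr_mem names
    (fun (taa : PySem.Dict String String) n => (g n).foldl (fun t2 tr => t2.insert tr n) taa)
    (fun (taa : PySem.Dict String String) n =>
      (((names.map (fun m => (m, g m))).lookup n).getD []).foldl
        (fun t2 rid => t2.insert rid n) taa)
    PySem.Dict.empty
    (by intro acc n hmem; dsimp only; rw [pv_lookup_map_self g names n hmem, Option.getD_some])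
  rw [this]
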